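-- pv_equiv track=rewrite | github.com/hlajungo/online_judge_python3 | itsa/約會配對問題.py | ava_max
-- ===== SOURCE A (Python) =====
-- def ava_max (mat: list[list[int]], stat: list[list[bool]]) -> tuple:
--     max_2d = 0
--     tar_ij = (-1,-1)
--     # find the max of array
--     for i,a in enumerate (mat):
--         for j,b in enumerate(a): # b == list[i][j]?
--             if stat[i][j] == False:
--                 if b > max_2d:
--                     tar_ij = (i,j)
--                     max_2d = max(b, max_2d)
--
--     # set the stat
--     i, j = tar_ij
--     # print ("max",max_2d, i, j)
--     for si in range(len(stat)):
--         stat[i][si] = True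
--         stat[si][j] = True
--     return (i,j)
-- ===== SOURCE B (Python) =====
-- def ava_max(mat: list[list[int]], stat: list[list[bool]]) -> tuple:
--     # pass 1: maximum value among unmarked entries (only values > 0 qualify)
--     m = 0
--     for i, row in enumerate(mat):
--         for j, b in enumerate(row):
--             if not stat[i][j] and b > m:
--                 m = b
--     # pass 2: first unmarked position holding that maximum, row-major
--     i, j = -1, -1
--     if m > 0:
--         for r, row in enumerate(mat):
--             for c, b in enumerate(row):
--                 if not stat[r][c] and b == m:
--                     i, j = r, c
--                     break
--             else:
--                 continue
--             break
--     # mark row i and column j (same in-place mutation as the original)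
--     for si in range(len(stat)):
--         stat[i][si] = True
--         stat[si][j] = True
--     return (i, j)
-- ===== Notes on version B (the rewrite author's own statement) =====
-- stated objective: alternative
-- what changed: A's single argmax scan carrying (max, position) is replaced by two separate passes: one computing the maximum unmarked value, then a first-occurrence search for that value (early-exit nested loops), with the same marking loop.
-- outside the precondition, e.g. on ava_max([[0]], [[False], [False, True]]): A returns (-1, -1), B returns (-1, -1)
import Mathlib
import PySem

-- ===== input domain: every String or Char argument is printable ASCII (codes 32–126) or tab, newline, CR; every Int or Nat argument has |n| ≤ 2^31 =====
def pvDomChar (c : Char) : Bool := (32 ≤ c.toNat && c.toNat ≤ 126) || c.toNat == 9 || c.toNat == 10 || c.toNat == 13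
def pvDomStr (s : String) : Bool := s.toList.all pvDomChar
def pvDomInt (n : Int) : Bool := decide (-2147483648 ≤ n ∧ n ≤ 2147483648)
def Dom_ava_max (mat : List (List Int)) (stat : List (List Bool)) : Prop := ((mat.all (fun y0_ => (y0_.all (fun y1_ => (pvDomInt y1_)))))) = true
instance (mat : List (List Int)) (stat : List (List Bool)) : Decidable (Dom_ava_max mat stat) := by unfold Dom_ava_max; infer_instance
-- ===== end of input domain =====

-- B replaces A's single argmax scan by two passes (max value first, then first position holding it);
-- objective: alternative decomposition, same cost. Both Pythons mutate `stat` in place (marking row i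
-- and column j identically); the equivalence proved here is about the RETURN value only, so the ports
-- omit that mutation, which never affects the returned pair.

-- stat[i][j]; in-range under Pre_ (exact there); default `true` is never read inside Pre_
def pyAt2 (stat : List (List Bool)) (i j : Int) : Bool :=
  PySem.List.pyGetD (PySem.List.pyGetD stat i []) j true

-- ===== PORT A =====
def ava_max (mat : List (List Int)) (stat : List (List Bool)) : Int × Int :=
  -- single scan carrying (max_2d, tar_ij)
  let r := (PySem.List.enumerate mat).foldl (fun st ia =>
    (PySem.List.enumerate ia.2).foldl (fun st jb =>
      if pyAt2 stat ia.1 jb.1 == false then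
        if jb.2 > st.1 then (max jb.2 st.1, (ia.1, jb.1)) else st
      else st) st) ((0 : Int), ((-1 : Int), (-1 : Int)))
  r.2

-- ===== PORT B =====
-- pass 1: maximum value among unmarked entries (only values > 0 qualify)
def bMax (mat : List (List Int)) (stat : List (List Bool)) : Int :=
  (PySem.List.enumerate mat).foldl (fun m ia =>
    (PySem.List.enumerate ia.2).foldl (fun m jb =>
      if !(pyAt2 stat ia.1 jb.1) && jb.2 > m then jb.2 else m) m) 0

-- pass 2, inner loop: first column of this row holding the maximum (break = return)
def bFindCol (stat : List (List Bool)) (m r : Int) : List (Int × Int) → Option Int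
  | [] => none
  | cb :: rest =>
    if !(pyAt2 stat r cb.1) && cb.2 == m then some cb.1 else bFindCol stat m r rest

-- pass 2, outer loop over the enumerated rows
def bFind (stat : List (List Bool)) (m : Int) : List (Int × List Int) → Int × Int
  | [] => (-1, -1)
  | ia :: rest =>
    match bFindCol stat m ia.1 (PySem.List.enumerate ia.2) with
    | some c => (ia.1, c)
    | none => bFind stat m rest

def ava_max_alt (mat : List (List Int)) (stat : List (List Bool)) : Int × Int :=
  let m := bMax mat stat
  if m > 0 then bFind stat m (PySem.List.enumerate mat) else (-1, -1)

-- ===== PRECONDITION & SPEC =====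
-- Pre_ says every index access A can perform is in range: `stat` has a row for every row of `mat`,
-- and every row of `stat` is long enough for the marking loop (≥ len(stat)) and for any column of
-- `mat`; outside it A's scan (`stat[i][j]`) or marking loop (`stat[i][si]`, `stat[si][j]`) can raise
-- IndexError, though some ragged inputs on which A happens to return (the winning indices staying
-- small) are excluded with it (see the cites in the claim).
def Pre_ava_max (mat : List (List Int)) (stat : List (List Bool)) : Prop :=
  mat.length ≤ stat.length ∧
    ∀ row ∈ stat, stat.length ≤ row.length ∧ ∀ r ∈ mat, r.length ≤ row.length
instance (mat : List (List Int)) (stat : List (List Bool)) : Decidable (Pre_ava_max mat stat) := by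
  unfold Pre_ava_max; infer_instance

def pvWitness_ava_max : List (List Int) × List (List Bool) :=
  ([[3, 1], [2, 4]], [[false, false], [false, false]])

def Spec_ava_max (mat : List (List Int)) (stat : List (List Bool)) (out : Int × Int) : Prop := out = ava_max_alt mat stat
instance (mat : List (List Int)) (stat : List (List Bool)) (out : Int × Int) : Decidable (Spec_ava_max mat stat out) := by unfold Spec_ava_max; infer_instance

-- ===== CLAIM (what is proved, stated in full; the proofs are below) =====
def Claim_equal_ava_max : Prop := ∀ (mat : List (List Int)) (stat : List (List Bool)), Dom_ava_max mat stat → Pre_ava_max mat stat → Spec_ava_max mat stat (ava_max mat stat)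

-- ===== LEMMAS AND PROOFS =====
-- (The equivalence in fact holds for every input of the ports; Pre_ delimits where the ports are
-- faithful to the Pythons, which raise outside it.)

-- each enumerated row flattened to (row index, column index, value) triples, in scan order
def trip (ia : Int × List Int) : List (Int × Int × Int) :=
  (PySem.List.enumerate ia.2).map (fun jb => (ia.1, jb.1, jb.2))

def lflat (l : List (Int × List Int)) : List (Int × Int × Int) := l.flatMap trip

-- A's step on a flattened triple
def stepT (stat : List (List Bool)) (st : Int × Int × Int) (t : Int × Int × Int) : Int × Int × Int :=
  if pyAt2 stat t.1 t.2.1 == false then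
    if t.2.2 > st.1 then (max t.2.2 st.1, (t.1, t.2.1)) else st
  else st

-- B's pass-1 step / fold on the flattened triples
def bstep (stat : List (List Bool)) (m : Int) (t : Int × Int × Int) : Int :=
  if !(pyAt2 stat t.1 t.2.1) && t.2.2 > m then t.2.2 else m

def mfold (stat : List (List Bool)) (l : List (Int × Int × Int)) (m : Int) : Int :=
  l.foldl (bstep stat) m

-- B's pass-2 predicate / target on the flattened triples
def ppred (stat : List (List Bool)) (v : Int) (t : Int × Int × Int) : Bool :=
  !(pyAt2 stat t.1 t.2.1) && t.2.2 == v

def firstEq (stat : List (List Bool)) (l : List (Int × Int × Int)) (v : Int) : Option (Int × Int × Int) :=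
  l.find? (ppred stat v)

theorem foldl_flatMap_nested {α β γ : Type} (h : α → List β) (f : γ → β → γ) (l : List α) (i : γ) :
    (l.flatMap h).foldl f i = l.foldl (fun s x => (h x).foldl f s) i := by
  induction l generalizing i with
  | nil => rfl
  | cons a l ih => simp [List.foldl_append, ih]

theorem firstEq_cons_pos (stat : List (List Bool)) (v : Int) (t : Int × Int × Int)
    (l : List (Int × Int × Int)) (h : ppred stat v t = true) :
    firstEq stat (t :: l) v = some t := List.find?_cons_of_pos h

theorem firstEq_cons_neg (stat : List (List Bool)) (v : Int) (t : Int × Int × Int)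
    (l : List (Int × Int × Int)) (h : ppred stat v t = false) :
    firstEq stat (t :: l) v = firstEq stat l v := List.find?_cons_of_neg (by simp [h])

theorem bstep_ge (stat : List (List Bool)) (m : Int) (t : Int × Int × Int) : m ≤ bstep stat m t := by
  unfold bstep; split
  · rename_i h; simp only [Bool.and_eq_true, decide_eq_true_eq] at h; omega
  · exact le_refl m

theorem mfold_mono (stat : List (List Bool)) (l : List (Int × Int × Int)) (m : Int) :
    m ≤ mfold stat l m := by
  induction l generalizing m with
  | nil => exact le_refl m
  | cons t l ih => exact le_trans (bstep_ge stat m t) (ih (bstep stat m t))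

theorem mfold_cons (stat : List (List Bool)) (t : Int × Int × Int) (l : List (Int × Int × Int)) (m : Int) :
    mfold stat (t :: l) m = mfold stat l (bstep stat m t) := rfl

theorem firstEq_isSome (stat : List (List Bool)) (l : List (Int × Int × Int)) :
    ∀ m : Int, m < mfold stat l m → (firstEq stat l (mfold stat l m)).isSome = true := by
  induction l with
  | nil => intro m h; simp [mfold] at h
  | cons t l ih =>
    intro m h
    rw [mfold_cons] at h ⊢
    by_cases hc : (!(pyAt2 stat t.1 t.2.1) && decide (t.2.2 > m)) = true
    · have hb : bstep stat m t = t.2.2 := by simp [bstep, hc]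
      rw [hb] at h ⊢
      by_cases he : mfold stat l t.2.2 = t.2.2
      · rw [he]
        have hp : ppred stat t.2.2 t = true := by
          simp only [Bool.and_eq_true, Bool.not_eq_eq_eq_not, Bool.not_true, decide_eq_true_eq] at hc
          simp [ppred, hc.1]
        rw [firstEq_cons_pos stat _ t l hp]
        rfl
      · have hlt : t.2.2 < mfold stat l t.2.2 :=
          lt_of_le_of_ne (mfold_mono stat l t.2.2) (Ne.symm he)
        have hs := ih t.2.2 hlt
        cases hp : ppred stat (mfold stat l t.2.2) t
        · rw [firstEq_cons_neg stat _ t l hp]; exact hs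
        · rw [firstEq_cons_pos stat _ t l hp]; rfl
    · have hb : bstep stat m t = m := by simp only [bstep]; rw [if_neg hc]
      rw [hb] at h ⊢
      have hs := ih m h
      have hp : ppred stat (mfold stat l m) t = false := by
        simp only [Bool.and_eq_true, Bool.not_eq_eq_eq_not, Bool.not_true, decide_eq_true_eq,
          not_and] at hc
        simp only [ppred, Bool.and_eq_false_iff, beq_eq_false_iff_ne, ne_eq]
        by_cases hq : pyAt2 stat t.1 t.2.1 = true
        · left; simp [hq]
        · right
          have hble : ¬ t.2.2 > m := by
            intro hgt
            exact absurd (hc (by simp [hq])) (by simp [hgt])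
          have := mfold_mono stat l m
          omega
      rw [firstEq_cons_neg stat _ t l hp]
      exact hs

-- the single-scan invariant: max component is B's pass-1 fold, and the target is the first
-- occurrence of that maximum whenever the maximum strictly increased
theorem scan_invariant (stat : List (List Bool)) (l : List (Int × Int × Int)) :
    ∀ (m0 : Int) (t0 : Int × Int),
      l.foldl (stepT stat) (m0, t0) =
        (mfold stat l m0,
          if m0 < mfold stat l m0 then
            (match firstEq stat l (mfold stat l m0) with
             | some t => (t.1, t.2.1)
             | none => t0)
          else t0) := by
  induction l with
  | nil => intro m0 t0; simp [mfold]
  | cons t l ih =>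
    intro m0 t0
    rw [List.foldl_cons, mfold_cons]
    by_cases hq : pyAt2 stat t.1 t.2.1 = true
    · -- marked entry: neither version changes state
      have h1 : stepT stat (m0, t0) t = (m0, t0) := by simp [stepT, hq]
      have hb : bstep stat m0 t = m0 := by simp [bstep, hq]
      rw [h1, hb, ih m0 t0]
      by_cases hlt : m0 < mfold stat l m0
      · rw [if_pos hlt, if_pos hlt, firstEq_cons_neg stat _ t l (by simp [ppred, hq])]
      · rw [if_neg hlt, if_neg hlt]
    · by_cases hgt : t.2.2 > m0
      · -- unmarked, strictly greater: A updates both components, B's fold takes the value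
        have h1 : stepT stat (m0, t0) t = (t.2.2, (t.1, t.2.1)) := by
          simp [stepT, hq, hgt, max_eq_left (le_of_lt hgt)]
        have hb : bstep stat m0 t = t.2.2 := by simp [bstep, hq, hgt]
        rw [h1, hb, ih t.2.2 (t.1, t.2.1)]
        have hmono := mfold_mono stat l t.2.2
        by_cases he : mfold stat l t.2.2 = t.2.2
        · rw [he, if_neg (by omega), if_pos hgt,
            firstEq_cons_pos stat _ t l (by simp [ppred, hq])]
        · have hlt : t.2.2 < mfold stat l t.2.2 := lt_of_le_of_ne hmono (Ne.symm he)
          rw [if_pos hlt, if_pos (by omega),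
            firstEq_cons_neg stat _ t l (by simp [ppred, hq]; omega)]
          have hs := firstEq_isSome stat l t.2.2 hlt
          cases hfind : firstEq stat l (mfold stat l t.2.2) with
          | none => rw [hfind] at hs; simp at hs
          | some x => rfl
      · -- unmarked, not greater: neither version changes state
        have h1 : stepT stat (m0, t0) t = (m0, t0) := by simp [stepT, hq, hgt]
        have hb : bstep stat m0 t = m0 := by simp [bstep, hq, hgt]
        rw [h1, hb, ih m0 t0]
        by_cases hlt : m0 < mfold stat l m0
        · rw [if_pos hlt, if_pos hlt,
            firstEq_cons_neg stat _ t l (by simp [ppred, hq]; omega)]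
        · rw [if_neg hlt, if_neg hlt]

-- B's pass-2 nested search equals find? on the flattened triples
theorem bFindCol_eq (stat : List (List Bool)) (m r : Int) (es : List (Int × Int)) :
    bFindCol stat m r es = (es.find? (fun cb => !(pyAt2 stat r cb.1) && cb.2 == m)).map (·.1) := by
  induction es with
  | nil => rfl
  | cons cb rest ih =>
    by_cases h : (!(pyAt2 stat r cb.1) && cb.2 == m) = true
    · rw [bFindCol, if_pos h, List.find?_cons]
      simp only [h]
      rfl
    · rw [bFindCol, if_neg h, List.find?_cons]
      simp only [Bool.not_eq_true] at h
      simp only [h]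
      exact ih

theorem bFind_eq (stat : List (List Bool)) (m : Int) (l : List (Int × List Int)) :
    bFind stat m l =
      (match firstEq stat (lflat l) m with
       | some t => (t.1, t.2.1)
       | none => (-1, -1)) := by
  induction l with
  | nil => rfl
  | cons ia rest ih =>
    rw [bFind, bFindCol_eq]
    have htrip : (trip ia).find? (ppred stat m)
        = ((PySem.List.enumerate ia.2).find? (fun cb => !(pyAt2 stat ia.1 cb.1) && cb.2 == m)).map
            (fun jb => (ia.1, jb.1, jb.2)) := by
      rw [trip, List.find?_map]
      rfl
    rw [show lflat (ia :: rest) = trip ia ++ lflat rest by rfl]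
    rw [firstEq, List.find?_append, htrip, ← firstEq]
    cases hcol : (PySem.List.enumerate ia.2).find? (fun cb => !(pyAt2 stat ia.1 cb.1) && cb.2 == m) with
    | some cb => simp
    | none => simpa using ih

-- both ports reduced to the flattened canonical form
theorem ava_max_canon (mat : List (List Int)) (stat : List (List Bool)) :
    ava_max mat stat =
      ((lflat (PySem.List.enumerate mat)).foldl (stepT stat) (0, (-1, -1))).2 := by
  simp only [ava_max, lflat, foldl_flatMap_nested, trip, List.foldl_map, stepT]

theorem bMax_canon (mat : List (List Int)) (stat : List (List Bool)) :
    bMax mat stat = mfold stat (lflat (PySem.List.enumerate mat)) 0 := by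
  simp only [bMax, mfold, bstep, lflat, foldl_flatMap_nested, trip, List.foldl_map]

-- ===== VERDICT (by name: the statement is the Claim_ definition above) =====
theorem ava_max_spec : Claim_equal_ava_max := by
  intro mat stat _ _
  unfold Spec_ava_max
  rw [ava_max_canon]
  show _ = (if bMax mat stat > 0 then bFind stat (bMax mat stat) (PySem.List.enumerate mat) else (-1, -1))
  rw [bMax_canon, bFind_eq, scan_invariant]
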